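-- pv_equiv track=rewrite | github.com/keigotak/JapanesePASAasaSequencePointingTask | src/pytorch/SimilarlityBERTPN.py | get_aggregated_label
-- ===== SOURCE A (Python) =====
-- def get_aggregated_label(offsets, tokens, labels):
--     aggregated_labels = []
--     for offset in offsets:
--         aggregated_labels.append(0)
--         items = set(labels[offset[0]: offset[1]])
--         if 1 in items:
--             aggregated_labels[-1] = 1
--     return aggregated_labels
-- ===== SOURCE B (Python) =====
-- def get_aggregated_label(offsets, tokens, labels):
--     # Prefix sums of 1-counts: each offset range answered in O(1).
--     pre = [0]
--     for x in labels:
--         pre.append(pre[-1] + (x == 1))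
--     n = len(labels)
--     out = []
--     for offset in offsets:
--         lo, hi, _ = slice(offset[0], offset[1]).indices(n)
--         out.append(1 if pre[lo] < pre[hi] else 0)
--     return out
-- ===== Notes on version B (the rewrite author's own statement) =====
-- stated objective: faster
-- what changed: Replaced the per-offset slice+set scan with one prefix-sum array of 1-counts so each offset range (bounds resolved by slice.indices) is answered by comparing two prefix counts in O(1).
import Mathlib
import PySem

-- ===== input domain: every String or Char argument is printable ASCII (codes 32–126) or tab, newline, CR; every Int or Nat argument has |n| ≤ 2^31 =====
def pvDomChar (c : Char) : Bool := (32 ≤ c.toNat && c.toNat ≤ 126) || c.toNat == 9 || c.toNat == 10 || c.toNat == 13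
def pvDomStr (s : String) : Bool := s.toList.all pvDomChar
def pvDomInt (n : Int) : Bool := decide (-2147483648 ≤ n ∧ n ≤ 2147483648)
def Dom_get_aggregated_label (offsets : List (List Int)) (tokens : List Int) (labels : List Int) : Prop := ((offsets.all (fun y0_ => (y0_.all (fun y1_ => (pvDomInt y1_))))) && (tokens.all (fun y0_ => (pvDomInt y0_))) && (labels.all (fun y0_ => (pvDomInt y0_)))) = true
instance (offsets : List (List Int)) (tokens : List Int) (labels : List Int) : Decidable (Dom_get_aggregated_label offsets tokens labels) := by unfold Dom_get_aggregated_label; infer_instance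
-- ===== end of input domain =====

-- B answers each offset range from one prefix-sum array of 1-counts instead of slicing+scanning per offset (objective: faster).

-- ===== PORT A =====
def get_aggregated_label (offsets : List (List Int)) (tokens : List Int) (labels : List Int) : List Int :=
  List.foldl (fun aggregated_labels offset =>
    let aggregated_labels := aggregated_labels ++ [(0 : Int)]
    match PySem.List.pyGet? offset 0, PySem.List.pyGet? offset 1 with
    | some o0, some o1 =>
      let items := PySem.Set.ofList (PySem.List.slice labels (some o0) (some o1))
      if (1 : Int) ∈ items then aggregated_labels.dropLast ++ [(1 : Int)] else aggregated_labels
    | _, _ => aggregated_labels) [] offsets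

-- ===== PORT B =====
-- port of Python's slice(lo, hi).indices(n) for step 1: one bound resolved to [0, n]
def pySliceIndex (n : Nat) (i : Int) : Nat :=
  (min (max (if i < 0 then i + n else i) 0) (n : Int)).toNat

def get_aggregated_label_alt (offsets : List (List Int)) (tokens : List Int) (labels : List Int) : List Int :=
  let pre : List Nat := List.scanl (fun c x => c + (if x = (1 : Int) then 1 else 0)) 0 labels
  let n := labels.length
  offsets.map (fun offset =>
    match PySem.List.pyGet? offset 0 with
    | none => 0
    | some lo =>
      match PySem.List.pyGet? offset 1 with
      | none => 0
      | some hi =>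
        if pre.getD (pySliceIndex n lo) 0 < pre.getD (pySliceIndex n hi) 0 then (1 : Int) else 0)

-- ===== PRECONDITION & SPEC =====
-- A raises IndexError (offset[0]/offset[1]) when an offset has fewer than 2 elements.
def Pre_get_aggregated_label (offsets : List (List Int)) (tokens : List Int) (labels : List Int) : Prop :=
  ∀ o ∈ offsets, 2 ≤ o.length
instance (offsets : List (List Int)) (tokens : List Int) (labels : List Int) : Decidable (Pre_get_aggregated_label offsets tokens labels) := by unfold Pre_get_aggregated_label; infer_instance

def pvWitness_get_aggregated_label : List (List Int) × List Int × List Int :=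
  ([[0, 2], [1, 1], [-2, 5]], [7, 8], [0, 1, 0])

def Spec_get_aggregated_label (offsets : List (List Int)) (tokens : List Int) (labels : List Int) (out : List Int) : Prop := out = get_aggregated_label_alt offsets tokens labels
instance (offsets : List (List Int)) (tokens : List Int) (labels : List Int) (out : List Int) : Decidable (Spec_get_aggregated_label offsets tokens labels out) := by unfold Spec_get_aggregated_label; infer_instance

-- ===== CLAIM (what is proved, stated in full; the proofs are below) =====
def Claim_equal_get_aggregated_label : Prop := ∀ (offsets : List (List Int)) (tokens : List Int) (labels : List Int), Dom_get_aggregated_label offsets tokens labels → Pre_get_aggregated_label offsets tokens labels → Spec_get_aggregated_label offsets tokens labels (get_aggregated_label offsets tokens labels)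

-- ===== LEMMAS AND PROOFS =====

-- slice.indices' bound resolution equals Python's slice-bound clamping
theorem pySliceIndex_eq_clampIdx (n : Nat) (i : Int) : pySliceIndex n i = PySem.List.clampIdx n i := by
  simp only [pySliceIndex, PySem.List.clampIdx]
  split_ifs <;> omega

-- the prefix array: pre[i] = number of 1s among the first i labels
theorem scanl_getD_count (l : List Int) : ∀ (c : Nat) (i : Nat), i ≤ l.length →
    (List.scanl (fun c x => c + (if x = (1 : Int) then 1 else 0)) c l).getD i 0
      = c + (l.take i).count 1 := by
  induction l with
  | nil =>
    intro c i h
    have hi0 : i = 0 := by simpa using h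
    subst hi0; simp
  | cons x xs ih =>
    intro c i h
    cases i with
    | zero => simp
    | succ j =>
      simp only [List.scanl_cons, List.getD_cons_succ, List.take_succ_cons, List.count_cons]
      rw [ih _ j (by simpa using h)]
      by_cases hx : x = (1 : Int) <;> simp [hx] <;> omega

-- 1 occurs in labels[lo:hi] iff the prefix 1-count strictly grows from lo to hi
theorem mem_slice_iff_count (labels : List Int) (a b : Int) :
    ((1 : Int) ∈ PySem.List.slice labels (some a) (some b)) ↔
      (labels.take (PySem.List.clampIdx labels.length a)).count 1
        < (labels.take (PySem.List.clampIdx labels.length b)).count 1 := by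
  set lo := PySem.List.clampIdx labels.length a with hlo
  set hi := PySem.List.clampIdx labels.length b with hhi
  have hslice : PySem.List.slice labels (some a) (some b)
      = List.take (hi - lo) (List.drop lo labels) := by
    simp [PySem.List.slice, hlo, hhi]
  by_cases hle : lo ≤ hi
  · have htake : labels.take hi = labels.take lo ++ (labels.drop lo).take (hi - lo) := by
      rw [← List.take_add]
      congr 1
      omega
    rw [hslice, htake, List.count_append]
    constructor
    · intro hmem
      have := List.count_pos_iff.mpr hmem
      omega
    · intro hlt
      exact List.count_pos_iff.mp (by omega)
  · have hempty : hi - lo = 0 := by omega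
    rw [hslice, hempty]
    simp only [List.take_zero, List.not_mem_nil, false_iff, not_lt]
    have : labels.take hi = (labels.take lo).take hi := by
      rw [List.take_take]
      congr 1
      omega
    rw [this]
    exact (List.take_sublist hi (labels.take lo)).count_le 1

-- A's fold appends exactly B's per-offset value
theorem foldA_eq_map (labels : List Int) (offsets : List (List Int)) :
    ∀ (init : List Int),
    List.foldl (fun aggregated_labels offset =>
      let aggregated_labels := aggregated_labels ++ [(0 : Int)]
      match PySem.List.pyGet? offset 0, PySem.List.pyGet? offset 1 with
      | some o0, some o1 =>
        let items := PySem.Set.ofList (PySem.List.slice labels (some o0) (some o1))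
        if (1 : Int) ∈ items then aggregated_labels.dropLast ++ [(1 : Int)] else aggregated_labels
      | _, _ => aggregated_labels) init offsets
    = init ++ offsets.map (fun offset =>
        match PySem.List.pyGet? offset 0 with
        | none => 0
        | some lo =>
          match PySem.List.pyGet? offset 1 with
          | none => 0
          | some hi =>
            if ((List.scanl (fun c x => c + (if x = (1 : Int) then 1 else 0)) 0 labels).getD
                  (pySliceIndex labels.length lo) 0)
                < ((List.scanl (fun c x => c + (if x = (1 : Int) then 1 else 0)) 0 labels).getD
                  (pySliceIndex labels.length hi) 0) then (1 : Int) else 0) := by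
  induction offsets with
  | nil => intro init; simp
  | cons o os ih =>
    intro init
    rw [List.foldl_cons, List.map_cons, ih]
    cases h0 : PySem.List.pyGet? o 0 with
    | none => simp
    | some lo =>
      cases h1 : PySem.List.pyGet? o 1 with
      | none => simp
      | some hi =>
        simp only [List.dropLast_concat]
        have hclamp : ∀ i : Int,
            (List.scanl (fun c x => c + (if x = (1 : Int) then 1 else 0)) 0 labels).getD
              (pySliceIndex labels.length i) 0 = (labels.take (PySem.List.clampIdx labels.length i)).count 1 := by
          intro i
          rw [pySliceIndex_eq_clampIdx, scanl_getD_count labels 0 _ (by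
            simp [PySem.List.clampIdx]; split_ifs <;> omega)]
          omega
        simp only [PySem.Set.mem_ofList]
        by_cases hm : (1 : Int) ∈ PySem.List.slice labels (some lo) (some hi)
        · have := (mem_slice_iff_count labels lo hi).mp hm
          rw [if_pos hm, if_pos (by rw [hclamp, hclamp]; exact this)]
          simp
        · have := fun h => hm ((mem_slice_iff_count labels lo hi).mpr h)
          rw [if_neg hm, if_neg (by rw [hclamp, hclamp]; exact this)]
          simp

-- ===== VERDICT (by name: the statement is the Claim_ definition above) =====
theorem get_aggregated_label_spec : Claim_equal_get_aggregated_label := by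
  intro offsets tokens labels _ _
  unfold Spec_get_aggregated_label get_aggregated_label get_aggregated_label_alt
  rw [foldA_eq_map]
  simp
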